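-- pv_equiv track=rewrite | github.com/shawn-peng/Cirq | cirq/docs/snippets_test.py | find_expected_outputs
-- ===== SOURCE A (Python) =====
-- from typing import Dict, List, TYPE_CHECKING
--
-- def find_expected_outputs(snippet: str) -> List[str]:
--     """Finds expected output lines within a snippet.
--
--     Expected output must be annotated with a leading '# prints'.
--     Lines below '# prints' must start with '# ' or be just '#' and not indent
--     any more than that in order to add an expected line. As soon as a line
--     breaks this pattern, expected output recording cuts off.
--
--     Adding words after '# prints' causes the expected output lines to be
--     skipped instead of included. For example, for random output say
--     '# prints something like' to avoid checking the following lines.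
--     """
--     start_key = '# prints'
--     continue_key = '# '
--     expected = []
--
--     printing = False
--     for line in snippet.split('\n'):
--         if printing:
--             if line.startswith(continue_key) or line == continue_key.strip():
--                 rest = line[len(continue_key):]
--                 expected.append(rest)
--             else:
--                 printing = False
--         elif line.startswith(start_key):
--             rest = line[len(start_key):]
--             if not rest.strip():
--                 printing = True
--
--     return expected
-- ===== SOURCE B (Python) =====
-- def find_expected_outputs(snippet: str):
--     """Staged, declarative formulation: a line is an expected-output line iff
--     it is a comment-continuation line and the most recent '# prints' marker
--     above it is more recent than the most recent non-continuation line above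
--     it.  Pass 1 classifies lines, pass 2 is a prefix scan of 'last marker' /
--     'last breaker' indices, pass 3 is a zip-filter comprehension."""
--     lines = snippet.split('\n')
--     is_cont = [l.startswith('# ') or l == '#' for l in lines]
--     last_marker = []  # index of last '# prints' marker strictly above (-1 if none)
--     last_break = []   # index of last non-continuation line strictly above (-1 if none)
--     m = b = -1
--     for i, l in enumerate(lines):
--         last_marker.append(m)
--         last_break.append(b)
--         if l.startswith('# prints') and not l[8:].strip():
--             m = i
--         if not (l.startswith('# ') or l == '#'):
--             b = i
--     return [l[2:] for (l, c), (m, b) in zip(zip(lines, is_cont),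
--                                             zip(last_marker, last_break))
--             if c and m > b]
-- ===== Notes on version B (the rewrite author's own statement) =====
-- stated objective: alternative
-- what changed: Replaced A's single-pass boolean 'printing' state machine with a staged declarative formulation: classify every line, prefix-scan the indices of the most recent marker and most recent non-continuation line, then zip-filter on the criterion 'continuation line whose last marker above is more recent than its last breaker above'.
import Mathlib
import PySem

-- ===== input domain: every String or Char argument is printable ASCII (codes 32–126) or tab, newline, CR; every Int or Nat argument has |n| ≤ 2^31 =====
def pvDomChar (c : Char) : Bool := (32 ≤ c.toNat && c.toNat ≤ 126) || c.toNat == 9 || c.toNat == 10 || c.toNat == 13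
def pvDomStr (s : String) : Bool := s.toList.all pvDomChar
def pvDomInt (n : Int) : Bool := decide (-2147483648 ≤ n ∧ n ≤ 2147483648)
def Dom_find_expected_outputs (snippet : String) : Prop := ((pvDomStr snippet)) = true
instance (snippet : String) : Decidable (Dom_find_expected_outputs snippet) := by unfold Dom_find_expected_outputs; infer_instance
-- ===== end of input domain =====

-- B replaces A's stateful flag machine with a staged, declarative formulation (classify lines, prefix-scan of
-- last-marker/last-breaker indices, zip-filter); same O(n) cost, alternative structure.

-- ===== PORT A =====
-- loop body of A's single for-loop; state = (expected, printing)
def pvAStep (st : List String × Bool) (line : String) : List String × Bool :=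
  if st.2 then
    if PySem.Str.startswith line "# " || line == PySem.Str.strip "# " then
      -- rest = line[len('# '):]  (len('# ') = 2)
      (st.1 ++ [PySem.Str.slice line (some 2) none], true)
    else
      (st.1, false)
  else if PySem.Str.startswith line "# prints" then
    -- rest = line[len('# prints'):]  (len('# prints') = 8)
    if PySem.Str.strip (PySem.Str.slice line (some 8) none) == "" then (st.1, true)
    else st
  else st

def find_expected_outputs (snippet : String) : List String :=
  (((PySem.Str.split? snippet "\n").getD []).foldl pvAStep ([], false)).1

-- ===== PORT B =====
-- l.startswith('# ') or l == '#'
def pvCont (l : String) : Bool := PySem.Str.startswith l "# " || l == "#"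
-- l.startswith('# prints') and not l[8:].strip()
def pvMarker (l : String) : Bool :=
  PySem.Str.startswith l "# prints" && (PySem.Str.strip (PySem.Str.slice l (some 8) none) == "")

-- body of Source B's prefix-scan loop; state = ((last_marker, last_break), m, b); p = (i, line)
def pvScanStep (st : (List Int × List Int) × Int × Int) (p : Int × String) :
    (List Int × List Int) × Int × Int :=
  ((st.1.1 ++ [st.2.1], st.1.2 ++ [st.2.2]),
   (if pvMarker p.2 then p.1 else st.2.1),
   (if !(pvCont p.2) then p.1 else st.2.2))

def find_expected_outputs_alt (snippet : String) : List String :=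
  let lines := (PySem.Str.split? snippet "\n").getD []
  let is_cont := lines.map pvCont
  let scan := (PySem.List.enumerate lines 0).foldl pvScanStep (([], []), -1, -1)
  ((lines.zip is_cont).zip (scan.1.1.zip scan.1.2)).filterMap
    (fun q => if q.1.2 && decide (q.2.1 > q.2.2) then some (PySem.Str.slice q.1.1 (some 2) none)
              else none)

-- ===== PRECONDITION & SPEC =====
-- A is total (it returns on every string); Pre_ excludes nothing and is stated only so that the
-- witness below documents a representative input with a non-empty expected-output block.
def Pre_find_expected_outputs (snippet : String) : Prop := True
instance (snippet : String) : Decidable (Pre_find_expected_outputs snippet) := by unfold Pre_find_expected_outputs; infer_instance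
def pvWitness_find_expected_outputs : String := "print(2 + 2)\n# prints\n# 4\n#\n# done\nx = 0"
def Spec_find_expected_outputs (snippet : String) (out : List String) : Prop := out = find_expected_outputs_alt snippet
instance (snippet : String) (out : List String) : Decidable (Spec_find_expected_outputs snippet out) := by unfold Spec_find_expected_outputs; infer_instance

-- ===== CLAIM (what is proved, stated in full; the proofs are below) =====
def Claim_equal_find_expected_outputs : Prop := ∀ (snippet : String), Dom_find_expected_outputs snippet → Pre_find_expected_outputs snippet → Spec_find_expected_outputs snippet (find_expected_outputs snippet)

-- ===== LEMMAS AND PROOFS =====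

theorem pvStrip_key : PySem.Str.strip "# " = "#" := by decide

theorem pvMarker_cont {l : String} (h : pvMarker l = true) : pvCont l = true := by
  simp only [pvMarker, Bool.and_eq_true] at h
  have h2 : ("# prints".toList) <+: l.toList :=
    (PySem.Chars.startswith_iff _ _).mp (by simpa using h.1)
  have h3 : ("# ".toList) <+: l.toList := List.IsPrefix.trans (by decide) h2
  have h4 : PySem.Chars.startswith l.toList "# ".toList = true :=
    (PySem.Chars.startswith_iff _ _).mpr h3
  simp only [pvCont, Bool.or_eq_true]
  left
  simpa using h4

-- A's loop body, written by the two values of the printing flag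
theorem pvAStep_false (acc : List String) (l : String) :
    pvAStep (acc, false) l = (acc, pvMarker l) := by
  simp only [pvAStep, pvMarker]
  cases hs : PySem.Str.startswith l "# prints" with
  | true =>
    cases hr : (PySem.Str.strip (PySem.Str.slice l (some 8) none) == "") with
    | true => simp [hr]
    | false => simp [hr]
  | false => simp

theorem pvAStep_true (acc : List String) (l : String) :
    pvAStep (acc, true) l =
      if pvCont l then (acc ++ [PySem.Str.slice l (some 2) none], true) else (acc, false) := by
  simp only [pvAStep, pvCont, pvStrip_key]
  rfl

-- reference recursion: the collected lines of ls when the lines above have last marker m,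
-- last breaker b, and the next line index is i
def pvRun : List String → Int → Int → Int → List String
  | [], _, _, _ => []
  | l :: rest, i, m, b =>
    (if pvCont l && decide (m > b) then [PySem.Str.slice l (some 2) none] else []) ++
    pvRun rest (i + 1) (if pvMarker l then i else m) (if !(pvCont l) then i else b)

-- A's fold equals pvRun: printing = (m > b), given m, b are indices strictly below i
theorem pvFoldA : ∀ (ls : List String) (acc : List String) (i m b : Int), m < i → b < i →
    (ls.foldl pvAStep (acc, decide (m > b))).1 = acc ++ pvRun ls i m b := by
  intro ls
  induction ls with
  | nil => intro acc i m b _ _; simp [pvRun]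
  | cons l rest ih =>
    intro acc i m b hm hb
    show ((rest.foldl pvAStep (pvAStep (acc, decide (m > b)) l)).1 = _)
    simp only [pvRun]
    by_cases hmb : m > b
    · have hp : decide (m > b) = true := by simpa
      rw [hp, pvAStep_true]
      cases hc : pvCont l with
      | true =>
        rw [if_pos rfl]
        cases hmk : pvMarker l with
        | true =>
          have H := ih (acc ++ [PySem.Str.slice l (some 2) none]) (i + 1) i b
            (by omega) (by omega)
          rw [show decide ((i : Int) > b) = true from by simpa using hb] at H
          rw [H]
          simp [List.append_assoc]
        | false =>
          have H := ih (acc ++ [PySem.Str.slice l (some 2) none]) (i + 1) m b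
            (by omega) (by omega)
          rw [hp] at H
          rw [H]
          simp [List.append_assoc]
      | false =>
        rw [if_neg (by simp)]
        have hmk : pvMarker l = false := by
          cases h : pvMarker l with
          | false => rfl
          | true => rw [pvMarker_cont h] at hc; exact hc
        have H := ih acc (i + 1) m i (by omega) (by omega)
        rw [show decide (m > i) = false from by simpa using le_of_lt hm] at H
        rw [H]
        simp [hc, hmk]
    · have hp : decide (m > b) = false := decide_eq_false hmb
      rw [hp, pvAStep_false]
      cases hmk : pvMarker l with
      | true =>
        have hc : pvCont l = true := pvMarker_cont hmk
        have H := ih acc (i + 1) i b (by omega) (by omega)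
        rw [show decide ((i : Int) > b) = true from by simpa using hb] at H
        rw [H]
        simp [hc, hp, hmk]
      | false =>
        cases hc : pvCont l with
        | true =>
          have H := ih acc (i + 1) m b (by omega) (by omega)
          rw [hp] at H
          rw [H]
          simp [hc, hp, hmk]
        | false =>
          have H := ih acc (i + 1) m i (by omega) (by omega)
          rw [show decide (m > i) = false from by simpa using le_of_lt hm] at H
          rw [H]
          simp [hc, hp, hmk]

-- the values recorded by Source B's prefix scan: (last_marker, last_break) pairs
def pvLM : List (Int × String) → Int → Int → List (Int × Int)
  | [], _, _ => []
  | p :: rest, m, b =>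
    (m, b) :: pvLM rest (if pvMarker p.2 then p.1 else m) (if !(pvCont p.2) then p.1 else b)

theorem pvScan_eq : ∀ (ps : List (Int × String)) (lm0 lb0 : List Int) (m b : Int),
    (ps.foldl pvScanStep ((lm0, lb0), m, b)).1.1 = lm0 ++ (pvLM ps m b).map Prod.fst ∧
    (ps.foldl pvScanStep ((lm0, lb0), m, b)).1.2 = lb0 ++ (pvLM ps m b).map Prod.snd := by
  intro ps
  induction ps with
  | nil => intro lm0 lb0 m b; simp [pvLM]
  | cons p rest ih =>
    intro lm0 lb0 m b
    rw [List.foldl_cons]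
    simp only [pvScanStep, pvLM, List.map_cons]
    exact ⟨by rw [(ih _ _ _ _).1]; simp, by rw [(ih _ _ _ _).2]; simp⟩

theorem pvZipSelf : ∀ ls : List String, ls.zip (ls.map pvCont) = ls.map (fun l => (l, pvCont l)) := by
  intro ls; induction ls with
  | nil => rfl
  | cons l rest ih => simp only [List.map_cons, List.zip_cons_cons, ih]

theorem pvB_run : ∀ (ls : List String) (i m b : Int),
    ((ls.map (fun l => (l, pvCont l))).zip (pvLM (PySem.List.enumerate ls i) m b)).filterMap
      (fun q => if q.1.2 && decide (q.2.1 > q.2.2) then some (PySem.Str.slice q.1.1 (some 2) none)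
                else none) = pvRun ls i m b := by
  intro ls
  induction ls with
  | nil => intro i m b; simp [pvRun, PySem.List.enumerate_nil, pvLM]
  | cons l rest ih =>
    intro i m b
    rw [PySem.List.enumerate_cons]
    simp only [pvLM, List.map_cons, List.zip_cons_cons, List.filterMap_cons, pvRun]
    have H := ih (i + 1) (if pvMarker l then i else m) (if !(pvCont l) then i else b)
    cases h : (pvCont l && decide (m > b)) with
    | true => simp; simpa using H
    | false => simp [h]; simpa using H

-- ===== VERDICT (by name: the statement is the Claim_ definition above) =====
theorem find_expected_outputs_spec : Claim_equal_find_expected_outputs := by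
  intro snippet _ _
  show find_expected_outputs snippet = find_expected_outputs_alt snippet
  unfold find_expected_outputs find_expected_outputs_alt
  set lines := (PySem.Str.split? snippet "\n").getD [] with hlines
  have hA : (lines.foldl pvAStep ([], false)).1 = pvRun lines 0 (-1) (-1) := by
    have h0 : (false : Bool) = decide ((-1 : Int) > -1) := by decide
    rw [h0, pvFoldA lines [] 0 (-1) (-1) (by omega) (by omega)]
    simp
  rw [hA]
  have hscan := pvScan_eq (PySem.List.enumerate lines 0) [] [] (-1) (-1)
  simp only [hscan.1, hscan.2, List.nil_append]
  rw [pvZipSelf]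
  have hz : ((pvLM (PySem.List.enumerate lines 0) (-1) (-1)).map Prod.fst).zip
      ((pvLM (PySem.List.enumerate lines 0) (-1) (-1)).map Prod.snd)
      = pvLM (PySem.List.enumerate lines 0) (-1) (-1) := by
    rw [List.zip_map']; simp
  rw [hz, pvB_run]
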